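-- pv_equiv track=rewrite | github.com/ScottMastro/pangyplot | data/parser/parse_gaf.py | path_to_lists
-- ===== SOURCE A (Python) =====
-- def path_to_lists(path):
--     ids, strands = [], []
--     pos=0
--     for i,char in enumerate(path):
--         if char == ">" or char == "<":
--             strand = "+" if char == ">" else "-"
--             strands.append(strand)
--             if i != 0: ids.append(path[pos:i])
--             pos=i+1
--
--     return ids, strands
-- ===== SOURCE B (Python) =====
-- def path_to_lists(path):
--     positions = [i for i, c in enumerate(path) if c in "<>"]
--     strands = ["+" if c == ">" else "-" for c in path if c in "<>"]
--     if positions and positions[0] != 0: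
--         ids = [path[:positions[0]]]
--     else:
--         ids = []
--     ids += [path[a + 1:b] for a, b in zip(positions, positions[1:])]
--     return ids, strands
-- ===== Notes on version B (the rewrite author's own statement) =====
-- stated objective: alternative
-- what changed: Replaced A's single scan with a mutable running pos pointer by an index-then-pairwise decomposition: first collect all marker positions, derive strands from the filtered characters, then build ids from the leading segment plus slices between adjacent marker-position pairs.
import Mathlib
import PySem

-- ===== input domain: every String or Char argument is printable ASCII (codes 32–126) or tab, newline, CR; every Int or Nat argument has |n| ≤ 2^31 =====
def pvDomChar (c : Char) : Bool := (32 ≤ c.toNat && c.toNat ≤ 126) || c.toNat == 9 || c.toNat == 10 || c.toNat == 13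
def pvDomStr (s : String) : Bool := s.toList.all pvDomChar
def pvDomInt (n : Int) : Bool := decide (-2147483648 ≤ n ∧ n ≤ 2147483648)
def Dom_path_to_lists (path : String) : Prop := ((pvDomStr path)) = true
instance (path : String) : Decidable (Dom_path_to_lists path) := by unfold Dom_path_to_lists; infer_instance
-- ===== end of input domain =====

-- B replaces A's single scan with a running `pos` pointer by an index-then-pairwise decomposition:
-- collect the marker positions first, then build ids from adjacent position pairs (objective: alternative).

-- ===== PORT A =====
-- the body of A's for-loop, one iteration on state (ids, strands, pos) and item (i, char)
def stepA (cs : List Char) (st : List String × List String × Int) (ic : Int × Char) :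
    List String × List String × Int :=
  let ids := st.1; let strands := st.2.1; let pos := st.2.2
  let i := ic.1; let char := ic.2
  if char = '>' ∨ char = '<' then
    let strand := if char = '>' then "+" else "-"
    let strands := strands ++ [strand]
    let ids := if i ≠ 0 then ids ++ [String.ofList (PySem.List.slice cs (some pos) (some i))] else ids
    (ids, strands, i + 1)
  else (ids, strands, pos)

-- literal transliteration of A: one fold over enumerate(path) carrying (ids, strands, pos)
def path_to_lists (path : String) : List String × List String :=
  let cs := path.toList
  let st := (PySem.List.enumerate cs 0).foldl (stepA cs) ([], [], 0)
  (st.1, st.2.1)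

-- ===== PORT B =====
-- literal transliteration of B (Source B): positions list, strands by filtered map,
-- ids = optional leading segment ++ one slice per adjacent marker pair
def path_to_lists_alt (path : String) : List String × List String :=
  let cs := path.toList
  let positions :=
    ((PySem.List.enumerate cs 0).filter (fun p => decide (p.2 = '<' ∨ p.2 = '>'))).map (·.1)
  let strands :=
    (cs.filter (fun c => decide (c = '<' ∨ c = '>'))).map (fun c => if c = '>' then "+" else "-")
  let ids : List String :=
    match positions with
    | [] => []
    | p :: _ => if p ≠ 0 then [String.ofList (PySem.List.slice cs none (some p))] else []
  let ids := ids ++ (positions.zip positions.tail).map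
      (fun ab => String.ofList (PySem.List.slice cs (some (ab.1 + 1)) (some ab.2)))
  (ids, strands)

-- ===== PRECONDITION & SPEC =====
def Spec_path_to_lists (path : String) (out : List String × List String) : Prop := out = path_to_lists_alt path
instance (path : String) (out : List String × List String) : Decidable (Spec_path_to_lists path out) := by unfold Spec_path_to_lists; infer_instance

-- ===== CLAIM (what is proved, stated in full; the proofs are below) =====
def Claim_equal_path_to_lists : Prop := ∀ (path : String), Dom_path_to_lists path → Spec_path_to_lists path (path_to_lists path)

-- ===== LEMMAS AND PROOFS =====

-- ids built from a previous-end `pos` and the list of remaining marker positions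
def idsFrom (cs : List Char) (pos : Int) : List Int → List String
  | [] => []
  | i :: r =>
    (if i ≠ 0 then [String.ofList (PySem.List.slice cs (some pos) (some i))] else []) ++
      idsFrom cs (i + 1) r

-- final value of A's `pos` after processing markers
def posAfter (pos : Int) : List Int → Int
  | [] => pos
  | i :: r => posAfter (i + 1) r

theorem stepA_marker (cs : List Char) (ids strands : List String) (pos : Int)
    (ic : Int × Char) (h : ic.2 = '>' ∨ ic.2 = '<') :
    stepA cs (ids, strands, pos) ic =
      ((if ic.1 ≠ 0 then ids ++ [String.ofList (PySem.List.slice cs (some pos) (some ic.1))] else ids),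
       strands ++ [if ic.2 = '>' then "+" else "-"], ic.1 + 1) := by
  simp only [stepA, if_pos h]

theorem stepA_other (cs : List Char) (ids strands : List String) (pos : Int)
    (ic : Int × Char) (h : ¬(ic.2 = '>' ∨ ic.2 = '<')) :
    stepA cs (ids, strands, pos) ic = (ids, strands, pos) := by
  simp only [stepA, if_neg h]

-- A's fold, characterised: over any enumerated pair list, it appends exactly the ids/strands
-- determined by the marker pairs, threading pos through posAfter.
theorem foldA_characterisation (cs : List Char) (l : List (Int × Char))
    (ids strands : List String) (pos : Int) :
    l.foldl (stepA cs) (ids, strands, pos) =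
    (ids ++ idsFrom cs pos ((l.filter (fun p => decide (p.2 = '>' ∨ p.2 = '<'))).map (·.1)),
     strands ++ (l.filter (fun p => decide (p.2 = '>' ∨ p.2 = '<'))).map
        (fun p => if p.2 = '>' then "+" else "-"),
     posAfter pos ((l.filter (fun p => decide (p.2 = '>' ∨ p.2 = '<'))).map (·.1))) := by
  induction l generalizing ids strands pos with
  | nil => simp [idsFrom, posAfter]
  | cons hd tl ih =>
    rw [List.foldl_cons]
    by_cases h : hd.2 = '>' ∨ hd.2 = '<'
    · rw [stepA_marker cs ids strands pos hd h]
      by_cases hi : hd.1 ≠ 0 <;>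
        simp [hi, ih, h, idsFrom, posAfter, List.append_assoc]
    · rw [stepA_other cs ids strands pos hd h]
      simp [ih, h]

-- with strictly increasing positions after a nonnegative first one, idsFrom (p+1) is the pairwise zip map
theorem idsFrom_succ_eq_zip (cs : List Char) (p : Int) (r : List Int)
    (hpos : 0 ≤ p) (hchain : (p :: r).Pairwise (· < ·)) :
    idsFrom cs (p + 1) r =
      ((p :: r).zip r).map
        (fun ab => String.ofList (PySem.List.slice cs (some (ab.1 + 1)) (some ab.2))) := by
  induction r generalizing p with
  | nil => simp [idsFrom]
  | cons q r' ih =>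
    have hpq : p < q := (List.pairwise_cons.1 hchain).1 q (by simp)
    have hq : q ≠ 0 := by omega
    have hchain' : (q :: r').Pairwise (· < ·) := (List.pairwise_cons.1 hchain).2
    simp only [idsFrom, if_pos hq, List.zip_cons_cons, List.map_cons,
      ih q (by omega) hchain', List.singleton_append]

-- idsFrom from position 0 over nonnegative strictly increasing marker positions
-- is B's "leading segment + adjacent pairs" construction
theorem idsFrom_zero_eq (cs : List Char) (qs : List Int)
    (hnn : ∀ x ∈ qs, 0 ≤ x) (hchain : qs.Pairwise (· < ·)) :
    idsFrom cs 0 qs =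
      (match qs with
        | [] => ([] : List String)
        | p :: _ => if p ≠ 0 then [String.ofList (PySem.List.slice cs none (some p))] else []) ++
      (qs.zip qs.tail).map
        (fun ab => String.ofList (PySem.List.slice cs (some (ab.1 + 1)) (some ab.2))) := by
  cases qs with
  | nil => simp [idsFrom]
  | cons p r =>
    have hp : 0 ≤ p := hnn p (by simp)
    rw [idsFrom, idsFrom_succ_eq_zip cs p r hp hchain]
    simp [PySem.List.slice_zero_start]

-- positions coming from a filtered enumeration are nonnegative and strictly increasing
theorem positions_nonneg_chain (cs : List Char) (pred : Int × Char → Bool) :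
    (∀ x ∈ ((PySem.List.enumerate cs 0).filter pred).map (·.1), 0 ≤ x) ∧
    (((PySem.List.enumerate cs 0).filter pred).map (·.1)).Pairwise (· < ·) := by
  constructor
  · intro x hx
    obtain ⟨p, hp, rfl⟩ := List.mem_map.1 hx
    obtain ⟨k, _, rfl⟩ := (PySem.List.mem_enumerate_iff _ _ _).1 (List.mem_of_mem_filter hp)
    simp
  · exact List.Pairwise.map _ (fun _ _ h => h)
      (List.Pairwise.sublist List.filter_sublist (PySem.List.pairwise_lt_enumerate cs 0))

-- the two marker tests (A checks '>' first, B checks '<' first) agree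
theorem marker_test_comm (c : Char) : decide (c = '>' ∨ c = '<') = decide (c = '<' ∨ c = '>') :=
  decide_eq_decide.2 or_comm

-- second components of the filtered enumeration are the filtered characters
theorem filter_enumerate_snd (cs : List Char) (q : Char → Bool) (s : Int) :
    ((PySem.List.enumerate cs s).filter (fun p => q p.2)).map (·.2) = cs.filter q := by
  induction cs generalizing s with
  | nil => simp [PySem.List.enumerate_nil]
  | cons c t ih =>
    rw [PySem.List.enumerate_cons]
    by_cases h : q c = true <;> simp [h, ih]

-- ===== VERDICT (by name: the statement is the Claim_ definition above) =====
theorem path_to_lists_spec : Claim_equal_path_to_lists := by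
  intro path _
  unfold Spec_path_to_lists path_to_lists path_to_lists_alt
  set cs := path.toList with hcs
  dsimp only
  rw [foldA_characterisation cs _ [] [] 0]
  have hcond : ∀ l : List (Int × Char),
      l.filter (fun p => decide (p.2 = '>' ∨ p.2 = '<')) =
      l.filter (fun p => decide (p.2 = '<' ∨ p.2 = '>')) :=
    fun l => List.filter_congr (fun p _ => marker_test_comm p.2)
  refine Prod.ext ?_ ?_
  · -- ids component
    simp only [List.nil_append]
    rw [hcond]
    obtain ⟨hnn, hchain⟩ := positions_nonneg_chain cs (fun p => decide (p.2 = '<' ∨ p.2 = '>'))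
    rw [idsFrom_zero_eq cs _ hnn hchain]
  · -- strands component
    simp only [List.nil_append]
    have hmm : ((PySem.List.enumerate cs 0).filter (fun p => decide (p.2 = '>' ∨ p.2 = '<'))).map
        (fun p => if p.2 = '>' then "+" else "-") =
        (((PySem.List.enumerate cs 0).filter (fun p => decide (p.2 = '>' ∨ p.2 = '<'))).map
          (·.2)).map (fun c => if c = '>' then "+" else "-") := by
      simp [List.map_map, Function.comp]
    rw [hmm, filter_enumerate_snd cs (fun c => decide (c = '>' ∨ c = '<')) 0]
    congr 1
    exact List.filter_congr (fun c _ => marker_test_comm c)
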